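-- pv_equiv track=rewrite | github.com/MateuszChilinski/Checkers | checkers.py | ParsePossibleMoves
-- ===== SOURCE A (Python) =====
-- eps = 0.001
--
-- def calculateDistance(x1,y1,x2,y2):
--      dist = (x2 - x1)**2 + (y2 - y1)**2
--      return dist
--
-- def ParsePossibleMoves(fromX,fromY,possible_moves):
--     can_conquest = False
--     for (possibleX, possibleY) in possible_moves:
--         if(abs(calculateDistance(fromX,fromY,possibleX,possibleY)-8) < eps):
--             can_conquest = True
--             break
--     if(can_conquest == False):
--         return possible_moves
--     new_possible_moves = set()
--     for (possibleX, possibleY) in possible_moves: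
--         if(abs(calculateDistance(fromX,fromY,possibleX,possibleY)-8) < eps):
--             new_possible_moves.add((possibleX, possibleY))
--     return new_possible_moves
-- ===== SOURCE B (Python) =====
-- def ParsePossibleMoves(fromX, fromY, possible_moves):
--     # Over integer squares, |d-8| < 0.001 holds iff d == 8, i.e. iff the move is one
--     # of the four diagonal jumps by 2: no distance computation, just a 4-candidate set.
--     jumps = {(fromX - 2, fromY - 2), (fromX - 2, fromY + 2),
--              (fromX + 2, fromY - 2), (fromX + 2, fromY + 2)}
--     captures = set(possible_moves) & jumps
--     return captures if captures else possible_moves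
-- ===== Notes on version B (the rewrite author's own statement) =====
-- stated objective: alternative
-- what changed: B replaces A's per-move distance computation, eps comparison, detection loop and second filtering loop by intersecting the move list with the constant four-element set of diagonal jump targets (the only integer points at squared distance 8), falling back to the original list when the intersection is empty.
import Mathlib
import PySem

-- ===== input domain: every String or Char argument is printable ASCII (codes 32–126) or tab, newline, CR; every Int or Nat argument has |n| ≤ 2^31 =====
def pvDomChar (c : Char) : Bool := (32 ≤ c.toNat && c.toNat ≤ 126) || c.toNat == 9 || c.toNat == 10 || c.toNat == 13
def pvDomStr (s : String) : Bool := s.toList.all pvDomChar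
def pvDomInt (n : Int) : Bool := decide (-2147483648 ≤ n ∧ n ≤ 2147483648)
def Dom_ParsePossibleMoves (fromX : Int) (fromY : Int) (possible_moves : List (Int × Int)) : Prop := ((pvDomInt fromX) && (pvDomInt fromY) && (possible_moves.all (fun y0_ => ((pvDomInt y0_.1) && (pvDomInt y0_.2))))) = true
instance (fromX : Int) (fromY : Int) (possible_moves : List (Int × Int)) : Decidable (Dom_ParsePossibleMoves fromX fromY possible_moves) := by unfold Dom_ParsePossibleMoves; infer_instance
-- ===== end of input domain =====

-- B drops the distance computation and eps test entirely: over integer coordinates the capture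
-- condition |d-8|<0.001 holds exactly for the four diagonal jumps by 2, so B intersects the move
-- list with that constant 4-candidate set (objective: alternative). When A returns a Python set
-- its iteration order is not modelled; the set is represented as its distinct elements (PySem.Set).

-- ===== PORT A =====
def calculateDistance (x1 y1 x2 y2 : Int) : Int := (x2 - x1)^2 + (y2 - y1)^2

-- abs(calculateDistance(...) - 8) < eps with eps = 0.001: all quantities are Python ints,
-- so the comparison is exact and holds iff the integer |dist - 8| is 0.
def pvCapture (fromX fromY px py : Int) : Bool := (calculateDistance fromX fromY px py - 8).natAbs == 0

-- A's first loop: scan for a capture move, break on the first hit (can_conquest flag)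
def pvDetect (fromX fromY : Int) : List (Int × Int) → Bool
  | [] => false
  | (px, py) :: rest => if pvCapture fromX fromY px py then true else pvDetect fromX fromY rest

def ParsePossibleMoves (fromX : Int) (fromY : Int) (possible_moves : List (Int × Int)) : List (Int × Int) :=
  let can_conquest := pvDetect fromX fromY possible_moves
  if can_conquest = false then possible_moves
  else
    -- A's second loop: new_possible_moves = set(); add each capture move
    possible_moves.foldl
      (fun s p => if pvCapture fromX fromY p.1 p.2 then PySem.Set.add s p else s)
      (PySem.Set.empty : PySem.Set (Int × Int))

-- ===== PORT B =====
def ParsePossibleMoves_alt (fromX : Int) (fromY : Int) (possible_moves : List (Int × Int)) : List (Int × Int) :=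
  let jumps : PySem.Set (Int × Int) :=
    PySem.Set.ofList [(fromX - 2, fromY - 2), (fromX - 2, fromY + 2),
                      (fromX + 2, fromY - 2), (fromX + 2, fromY + 2)]
  let captures := PySem.Set.inter (PySem.Set.ofList possible_moves) jumps
  if captures.isEmpty then possible_moves else captures

-- ===== PRECONDITION & SPEC =====
def Spec_ParsePossibleMoves (fromX : Int) (fromY : Int) (possible_moves : List (Int × Int)) (out : List (Int × Int)) : Prop := out = ParsePossibleMoves_alt fromX fromY possible_moves
instance (fromX : Int) (fromY : Int) (possible_moves : List (Int × Int)) (out : List (Int × Int)) : Decidable (Spec_ParsePossibleMoves fromX fromY possible_moves out) := by unfold Spec_ParsePossibleMoves; infer_instance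

-- ===== CLAIM =====
def Claim_equal_ParsePossibleMoves : Prop := ∀ (fromX : Int) (fromY : Int) (possible_moves : List (Int × Int)), Dom_ParsePossibleMoves fromX fromY possible_moves → Spec_ParsePossibleMoves fromX fromY possible_moves (ParsePossibleMoves fromX fromY possible_moves)

-- ===== LEMMAS AND PROOFS =====

-- the geometric characterisation: squared distance 8 ⟺ one of the four diagonal jumps by 2
theorem pvCapture_iff_jump (fromX fromY px py : Int) :
    pvCapture fromX fromY px py = true ↔
      (px, py) ∈ [(fromX - 2, fromY - 2), (fromX - 2, fromY + 2),
                  (fromX + 2, fromY - 2), (fromX + 2, fromY + 2)] := by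
  unfold pvCapture calculateDistance
  simp only [beq_iff_eq, Int.natAbs_eq_zero, List.mem_cons,
    Prod.mk.injEq, List.not_mem_nil, or_false]
  constructor
  · intro h
    have h8 : (px - fromX)^2 + (py - fromY)^2 = 8 := by omega
    have ha0 : (0:Int) ≤ (px - fromX)^2 := sq_nonneg _
    have hb0 : (0:Int) ≤ (py - fromY)^2 := sq_nonneg _
    have hsa : (px - fromX)^2 ≤ 8 := by linarith
    have hsb : (py - fromY)^2 ≤ 8 := by linarith
    have ha1 : px - fromX < 3 := by nlinarith
    have ha2' : -3 < px - fromX := by nlinarith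
    have hb1 : py - fromY < 3 := by nlinarith
    have hb2' : -3 < py - fromY := by nlinarith
    set a := px - fromX with hadef
    set b := py - fromY with hbdef
    have ha2 : a = -2 ∨ a = -1 ∨ a = 0 ∨ a = 1 ∨ a = 2 := by omega
    have hb2 : b = -2 ∨ b = -1 ∨ b = 0 ∨ b = 1 ∨ b = 2 := by omega
    rcases ha2 with h1|h1|h1|h1|h1 <;> rcases hb2 with h2|h2|h2|h2|h2 <;>
      rw [h1, h2] at h8 <;> norm_num at h8 <;> omega
  · rintro (⟨h1, h2⟩|⟨h1, h2⟩|⟨h1, h2⟩|⟨h1, h2⟩) <;> subst h1 <;> subst h2 <;> ring_nf <;> omega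

-- A's break-loop is the 'any' of the capture predicate
theorem pvDetect_eq_any (fromX fromY : Int) (pm : List (Int × Int)) :
    pvDetect fromX fromY pm = pm.any (fun p => pvCapture fromX fromY p.1 p.2) := by
  induction pm with
  | nil => rfl
  | cons p rest ih =>
    obtain ⟨px, py⟩ := p
    by_cases h : pvCapture fromX fromY px py <;> simp [pvDetect, h, ih]

-- A's conditional-add fold over the whole list is the add-fold over the filtered list
theorem pvFold_filter {α : Type} [BEq α] (c : α → Bool) (xs : List α) (s : PySem.Set α) :
    xs.foldl (fun s p => if c p then PySem.Set.add s p else s) s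
      = (xs.filter c).foldl PySem.Set.add s := by
  induction xs generalizing s with
  | nil => rfl
  | cons x rest ih =>
    by_cases h : c x <;> simp [h, ih]

-- filter commutes with discard
theorem pvFilter_discard {α : Type} [BEq α] [LawfulBEq α] (c : α → Bool) (s : PySem.Set α) (x : α) :
    (PySem.Set.discard s x).filter c = PySem.Set.discard (s.filter c) x := by
  show (s.filter _).filter c = (s.filter c).filter _
  rw [List.filter_filter, List.filter_filter]
  apply List.filter_congr
  intro a _
  exact Bool.and_comm _ _

-- set-building commutes with filtering: set of filtered list = filter of the set
theorem pvOfList_filter {α : Type} [BEq α] [LawfulBEq α] (c : α → Bool) (xs : List α) :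
    PySem.Set.ofList (xs.filter c) = (PySem.Set.ofList xs).filter c := by
  induction xs with
  | nil => rfl
  | cons x rest ih =>
    rw [PySem.Set.ofList_cons, List.filter_cons]
    by_cases h : c x
    · rw [if_pos h, PySem.Set.ofList_cons, List.filter_cons, if_pos h, ih, pvFilter_discard]
    · rw [if_neg h, ih, List.filter_cons, if_neg h, pvFilter_discard]
      symm
      show (List.filter c (PySem.Set.ofList rest)).filter (fun y => y != x)
            = List.filter c (PySem.Set.ofList rest)
      apply List.filter_eq_self.mpr
      intro a ha
      have hca := List.of_mem_filter ha
      simp only [bne_iff_ne, ne_eq]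
      intro hax
      rw [hax] at hca
      exact h hca

-- ===== VERDICT =====
theorem ParsePossibleMoves_spec : Claim_equal_ParsePossibleMoves := by
  unfold Claim_equal_ParsePossibleMoves
  intro fromX fromY pm _
  unfold Spec_ParsePossibleMoves ParsePossibleMoves ParsePossibleMoves_alt
  simp only [pvDetect_eq_any]
  have hcap : ∀ p : Int × Int, pvCapture fromX fromY p.1 p.2 =
      (PySem.Set.ofList [(fromX - 2, fromY - 2), (fromX - 2, fromY + 2),
                         (fromX + 2, fromY - 2), (fromX + 2, fromY + 2)] : PySem.Set (Int × Int)).contains p := by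
    intro ⟨px, py⟩
    rw [Bool.eq_iff_iff, pvCapture_iff_jump, PySem.Set.contains_iff, PySem.Set.mem_ofList]
  have hinter : PySem.Set.inter (PySem.Set.ofList pm)
      (PySem.Set.ofList [(fromX - 2, fromY - 2), (fromX - 2, fromY + 2),
                         (fromX + 2, fromY - 2), (fromX + 2, fromY + 2)])
      = PySem.Set.ofList (pm.filter (fun p => pvCapture fromX fromY p.1 p.2)) := by
    show (PySem.Set.ofList pm).filter _ = _
    rw [pvOfList_filter]
    apply List.filter_congr
    intro p _
    exact (hcap p).symm
  simp only [hinter, pvFold_filter]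
  rw [show (PySem.Set.empty : PySem.Set (Int × Int)) = [] from rfl, ← PySem.Set.ofList_eq_foldl]
  by_cases h : pm.any (fun p => pvCapture fromX fromY p.1 p.2)
  · have hne : pm.filter (fun p => pvCapture fromX fromY p.1 p.2) ≠ [] := by
      simp only [List.any_eq_true] at h
      obtain ⟨p, hp, hc⟩ := h
      intro hnil
      have : p ∈ pm.filter (fun p => pvCapture fromX fromY p.1 p.2) := List.mem_filter.mpr ⟨hp, hc⟩
      simp [hnil] at this
    have hof : PySem.Set.ofList (pm.filter (fun p => pvCapture fromX fromY p.1 p.2)) ≠ [] := by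
      intro hnil
      obtain ⟨x, hx⟩ := List.exists_mem_of_ne_nil _ hne
      have hmem : x ∈ PySem.Set.ofList (pm.filter (fun p => pvCapture fromX fromY p.1 p.2)) :=
        (PySem.Set.mem_ofList _ x).mpr hx
      simp [hnil] at hmem
    simp [h, List.isEmpty_iff, hof]
  · have hnil : pm.filter (fun p => pvCapture fromX fromY p.1 p.2) = [] :=
      List.filter_eq_nil_iff.mpr (by
        simp only [List.any_eq_true, not_exists, not_and] at h
        intro a ha; simp [h a ha])
    simp [h, hnil, PySem.Set.ofList]
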